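-- pv_equiv track=rewrite | github.com/rahma-muhammad/CAT-Problem_Solving | Sliding Window/Practice/summary power.py | FindPower
-- ===== SOURCE A (Python) =====
-- def FindPower(arr, n , k):
--     change_arr = [1 if arr[i] != arr[i+1] else 0 for i in range(n-1)]
--     summ = sum(change_arr[:k])
--     res = 0
--     res += summ
--     for i in range(1, n-k):
--         summ += change_arr[k+i-1]
--         summ -= change_arr[i-1]
--         res += summ
--     return res
-- ===== SOURCE B (Python) =====
-- def FindPower(arr, n, k):
--     change = [0 if arr[i] == arr[i + 1] else 1 for i in range(n - 1)]
--     prefix = [0]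
--     for c in change:
--         prefix.append(prefix[-1] + c)
--     res = sum(change[:k])
--     for i in range(1, n - k):
--         res += prefix[i + k] - prefix[i]
--     return res
-- ===== Notes on version B (the rewrite author's own statement) =====
-- stated objective: alternative
-- what changed: Replaces A's incremental sliding-window running sum (summ updated in place each iteration) with a precomputed prefix-sum table; each window after the first is obtained as a prefix difference prefix[i+k]-prefix[i], so the loop carries no running-window state.
import Mathlib
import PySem

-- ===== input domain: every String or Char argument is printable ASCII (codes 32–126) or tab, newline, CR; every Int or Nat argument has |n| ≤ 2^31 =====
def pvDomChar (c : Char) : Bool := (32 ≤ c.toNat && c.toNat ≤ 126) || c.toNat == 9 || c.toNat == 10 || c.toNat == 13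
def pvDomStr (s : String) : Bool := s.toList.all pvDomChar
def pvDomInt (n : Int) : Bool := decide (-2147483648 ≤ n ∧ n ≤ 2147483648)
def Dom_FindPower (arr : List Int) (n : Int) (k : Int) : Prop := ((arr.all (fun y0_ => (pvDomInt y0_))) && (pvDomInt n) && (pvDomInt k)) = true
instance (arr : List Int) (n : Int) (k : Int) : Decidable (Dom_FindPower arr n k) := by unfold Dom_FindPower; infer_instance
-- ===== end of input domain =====

-- B replaces A's incremental sliding-window running sum with a prefix-sum table and
-- window-as-prefix-difference loop; same O(n) cost, different loop structure ("alternative").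

-- ===== PORT A =====
def FindPower (arr : List Int) (n : Int) (k : Int) : Int :=
  let change := (PySem.List.pyRange 0 (n-1) 1).map (fun i =>
    if PySem.List.pyGetD arr i 0 ≠ PySem.List.pyGetD arr (i+1) 0 then (1 : Int) else 0)
  let summ := (PySem.List.slice change none (some k)).sum
  let res : Int := 0
  let res := res + summ
  let st := (PySem.List.pyRange 1 (n-k) 1).foldl
    (fun (st : Int × Int) i =>
      let s := st.1 + PySem.List.pyGetD change (k + i - 1) 0
      let s := s - PySem.List.pyGetD change (i - 1) 0
      (s, st.2 + s)) (summ, res)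
  st.2

-- ===== PORT B =====
def FindPower_alt (arr : List Int) (n : Int) (k : Int) : Int :=
  let change := (PySem.List.pyRange 0 (n-1) 1).map (fun i =>
    if PySem.List.pyGetD arr i 0 = PySem.List.pyGetD arr (i+1) 0 then (0 : Int) else 1)
  let pref := change.foldl (fun p c => p ++ [PySem.List.pyGetD p (-1) 0 + c]) [0]
  let res := (PySem.List.slice change none (some k)).sum
  (PySem.List.pyRange 1 (n-k) 1).foldl
    (fun r i => r + (PySem.List.pyGetD pref (i + k) 0 - PySem.List.pyGetD pref i 0)) res

-- ===== PRECONDITION & SPEC =====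
-- Pre_ is exactly the set of inputs on which the Python A returns (A raises IndexError
-- when n exceeds len(arr) with n ≥ 2, or when k < 0 and the window loop runs).
def Pre_FindPower (arr : List Int) (n : Int) (k : Int) : Prop :=
  (2 ≤ n → n ≤ arr.length) ∧ (k < 0 → n ≤ k + 1)
instance (arr : List Int) (n : Int) (k : Int) : Decidable (Pre_FindPower arr n k) := by
  unfold Pre_FindPower; infer_instance

def pvWitness_FindPower : List Int × Int × Int := ([1, 2, 2, 3], 4, 2)

def Spec_FindPower (arr : List Int) (n : Int) (k : Int) (out : Int) : Prop := out = FindPower_alt arr n k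
instance (arr : List Int) (n : Int) (k : Int) (out : Int) : Decidable (Spec_FindPower arr n k out) := by unfold Spec_FindPower; infer_instance

-- ===== CLAIM (what is proved, stated in full; the proofs are below) =====
def Claim_equal_FindPower : Prop := ∀ (arr : List Int) (n : Int) (k : Int), Dom_FindPower arr n k → Pre_FindPower arr n k → Spec_FindPower arr n k (FindPower arr n k)

-- ===== LEMMAS AND PROOFS =====

-- the two comprehensions build the same 0/1 change array
lemma change_eq (arr : List Int) (n : Int) :
    (PySem.List.pyRange 0 (n-1) 1).map (fun i =>
      if PySem.List.pyGetD arr i 0 = PySem.List.pyGetD arr (i+1) 0 then (0 : Int) else 1)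
    = (PySem.List.pyRange 0 (n-1) 1).map (fun i =>
      if PySem.List.pyGetD arr i 0 ≠ PySem.List.pyGetD arr (i+1) 0 then (1 : Int) else 0) := by
  apply List.map_congr_left
  intro i _
  by_cases h : PySem.List.pyGetD arr i 0 = PySem.List.pyGetD arr (i+1) 0 <;> simp [h]

-- prefix sums of ch
def psum (ch : List Int) (j : ℕ) : Int := (ch.take j).sum

lemma psum_succ (ch : List Int) (j : ℕ) (hj : j < ch.length) :
    psum ch (j + 1) = psum ch j + ch.getD j 0 := by
  unfold psum
  rw [List.take_add_one, List.sum_append, List.getElem?_eq_getElem hj]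
  simp [List.getD_eq_getElem?_getD, List.getElem?_eq_getElem hj]

-- B's prefix foldl builds the table of prefix sums
lemma prefix_foldl (ch : List Int) :
    ch.foldl (fun p c => p ++ [PySem.List.pyGetD p (-1) 0 + c]) [0]
    = (List.range (ch.length + 1)).map (psum ch) := by
  induction ch using List.reverseRecOn with
  | nil => simp [psum]
  | append_singleton xs x ih =>
    rw [List.foldl_append]
    rw [ih]
    simp only [List.foldl_cons, List.foldl_nil]
    have hne : (List.range (xs.length + 1)).map (psum xs) ≠ [] := by simp
    have hlast : PySem.List.pyGetD ((List.range (xs.length + 1)).map (psum xs)) (-1) 0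
        = psum xs xs.length := by
      rw [PySem.List.pyGetD_neg_one _ 0 hne]
      rw [List.getLast_eq_getElem]
      simp
    rw [hlast]
    conv_rhs => rw [show (xs ++ [x]).length + 1 = (xs.length + 1) + 1 by simp,
      List.range_succ, List.map_append]
    congr 1
    · apply List.map_congr_left
      intro j hj
      simp only [List.mem_range] at hj
      simp [psum, List.take_append_of_le_length (by omega : j ≤ xs.length)]
    · simp [psum, List.take_of_length_le]

-- A's window loop, unrolled: after t iterations the running sum is a prefix difference
-- and the accumulated result is the sum of the prefix differences.
lemma loopA (ch : List Int) (kn : ℕ) (r0 : Int) (t : ℕ) (hlen : kn + t ≤ ch.length) :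
    (PySem.List.pyRange 1 (1 + (t : Int)) 1).foldl
      (fun (st : Int × Int) i =>
        let s := st.1 + PySem.List.pyGetD ch ((kn : Int) + i - 1) 0
        let s := s - PySem.List.pyGetD ch (i - 1) 0
        (s, st.2 + s)) (psum ch kn, r0)
    = (psum ch (t + kn) - psum ch t,
       r0 + ∑ j ∈ Finset.range t, (psum ch (j + 1 + kn) - psum ch (j + 1))) := by
  induction t with
  | zero =>
    rw [show (1:Int) + (0:ℕ) = 1 by norm_num, PySem.List.pyRange_one_eq_nil le_rfl]
    simp [psum]
  | succ t ih =>
    have h1 : (1 : Int) + (t + 1 : ℕ) = (1 + (t : Int)) + 1 := by omega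
    rw [h1, PySem.List.pyRange_one_succ_right (by omega), List.foldl_append,
      ih (by omega)]
    simp only [List.foldl_cons, List.foldl_nil]
    have e1 : (kn : Int) + (1 + t) - 1 = ((kn + t : ℕ) : Int) := by omega
    have e2 : (1 : Int) + t - 1 = ((t : ℕ) : Int) := by omega
    rw [e1, e2, PySem.List.pyGetD_natCast, PySem.List.pyGetD_natCast]
    have hk : psum ch (t + 1 + kn) = psum ch (t + kn) + ch.getD (kn + t) 0 := by
      rw [show t + 1 + kn = kn + t + 1 by omega, show t + kn = kn + t by omega]
      exact psum_succ ch (kn + t) (by omega)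
    have ht : psum ch (t + 1) = psum ch t + ch.getD t 0 := psum_succ ch t (by omega)
    simp only [Prod.mk.injEq]
    constructor
    · rw [hk, ht]; ring
    · rw [Finset.sum_range_succ, hk, ht]; ring

-- B's window loop, with the prefix table in place of the running sum
lemma loopB (ch : List Int) (kn : ℕ) (r0 : Int) (t : ℕ) (hlen : kn + t ≤ ch.length) :
    (PySem.List.pyRange 1 (1 + (t : Int)) 1).foldl
      (fun r i => r + (PySem.List.pyGetD ((List.range (ch.length + 1)).map (psum ch)) (i + (kn : Int)) 0
                      - PySem.List.pyGetD ((List.range (ch.length + 1)).map (psum ch)) i 0)) r0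
    = r0 + ∑ j ∈ Finset.range t, (psum ch (j + 1 + kn) - psum ch (j + 1)) := by
  induction t with
  | zero =>
    rw [show (1:Int) + (0:ℕ) = 1 by norm_num, PySem.List.pyRange_one_eq_nil le_rfl]
    simp
  | succ t ih =>
    have h1 : (1 : Int) + (t + 1 : ℕ) = (1 + (t : Int)) + 1 := by omega
    rw [h1, PySem.List.pyRange_one_succ_right (by omega), List.foldl_append,
      ih (by omega)]
    simp only [List.foldl_cons, List.foldl_nil]
    have e1 : (1 : Int) + t + kn = ((t + 1 + kn : ℕ) : Int) := by omega
    have e2 : (1 : Int) + t = ((t + 1 : ℕ) : Int) := by omega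
    rw [e1, e2, PySem.List.pyGetD_natCast, PySem.List.pyGetD_natCast]
    rw [List.getD_eq_getElem?_getD, List.getD_eq_getElem?_getD]
    rw [List.getElem?_map, List.getElem?_map]
    rw [List.getElem?_range (by omega : t + 1 + kn < ch.length + 1),
      List.getElem?_range (by omega : t + 1 < ch.length + 1)]
    simp only [Option.map_some, Option.getD_some]
    rw [Finset.sum_range_succ]
    ring

-- ===== VERDICT (by name: the statement is the Claim_ definition above) =====
theorem FindPower_spec : Claim_equal_FindPower := by
  intro arr n k _ hpre
  unfold Spec_FindPower FindPower FindPower_alt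
  rw [change_eq]
  set ch := (PySem.List.pyRange 0 (n-1) 1).map (fun i =>
    if PySem.List.pyGetD arr i 0 ≠ PySem.List.pyGetD arr (i+1) 0 then (1 : Int) else 0) with hch
  simp only []
  rw [prefix_foldl]
  have hchlen : (ch.length : Int) = max (n - 1) 0 := by
    rw [hch, List.length_map, PySem.List.length_pyRange_one]
    omega
  by_cases hloop : n - k ≤ 1
  · -- the window loop is empty in both programs
    rw [PySem.List.pyRange_one_eq_nil (by omega : n - k ≤ 1)]
    simp
  · -- loop runs: k ≥ 0 (else Pre_ forces n ≤ k+1, i.e. n - k ≤ 1), and n ≥ 2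
    push Not at hloop
    have hk0 : 0 ≤ k := by
      by_contra hk
      push Not at hk
      have := hpre.2 hk
      omega
    set t : ℕ := (n - k - 1).toNat with htdef
    have htn : (t : Int) = n - k - 1 := by omega
    have hnk : n - k = 1 + (t : Int) := by omega
    have hkn : ((k.toNat : ℕ) : Int) = k := by omega
    have hlen : k.toNat + t ≤ ch.length := by omega
    have hsum0 : (PySem.List.slice ch none (some k)).sum = psum ch k.toNat := by
      rw [PySem.List.slice_to ch hk0]; rfl
    rw [hsum0, hnk]
    have hA := loopA ch k.toNat (0 + psum ch k.toNat) t hlen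
    have hB := loopB ch k.toNat (psum ch k.toNat) t hlen
    rw [hkn] at hA hB
    rw [hA, hB]
    simp
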